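-- pv_equiv track=rewrite | github.com/romanzhg/cs221 | hw_1_foundations/submission.py | findSingletonWords
-- ===== SOURCE A (Python) =====
-- import collections
--
-- def findSingletonWords(text):
--     """
--     Splits the string |text| by whitespace and returns the set of words that
--     occur exactly once.
--     You might find it useful to use collections.defaultdict(int).
--     """
--     # BEGIN_YOUR_CODE (our solution is 4 lines of code, but don't worry if you deviate from this)
--     dd = collections.defaultdict(int)
--     for word in text.split():
--         dd[word] += 1
--
--     rtn = set()
--     for key in dd:
--         if dd[key] == 1:
--             rtn.add(key)
--     return rtn
-- ===== SOURCE B (Python) =====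
-- def findSingletonWords(text):
--     """Set of words occurring exactly once: a single pass over the words with
--     two sets as a state machine -- `once` holds words seen exactly once so far,
--     `repeated` holds words seen at least twice; no counting at all."""
--     once, repeated = set(), set()
--     for w in text.split():
--         if w in once:
--             once.discard(w)
--             repeated.add(w)
--         elif w not in repeated:
--             once.add(w)
--     return once
-- ===== Notes on version B (the rewrite author's own statement) =====
-- stated objective: alternative
-- what changed: Replaces A's count-then-filter (defaultdict frequency table plus a second loop over its keys) by a single pass that maintains two sets as a state machine ('seen once' / 'seen more than once') and never counts anything.
import Mathlib
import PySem

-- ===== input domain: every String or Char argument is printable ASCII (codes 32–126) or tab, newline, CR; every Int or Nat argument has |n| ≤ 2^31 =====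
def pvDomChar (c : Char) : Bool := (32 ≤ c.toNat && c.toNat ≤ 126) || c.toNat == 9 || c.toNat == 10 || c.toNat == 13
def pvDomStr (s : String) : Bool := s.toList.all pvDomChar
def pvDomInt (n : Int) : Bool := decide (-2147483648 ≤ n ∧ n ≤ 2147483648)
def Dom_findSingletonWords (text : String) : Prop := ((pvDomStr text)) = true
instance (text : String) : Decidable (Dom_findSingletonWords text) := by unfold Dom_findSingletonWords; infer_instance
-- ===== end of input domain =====

-- B replaces A's count-then-filter (frequency dict + key loop) by one pass with two
-- sets as a state machine ('seen once' / 'seen more than once'); no counting at all.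

-- ===== PORT A =====
def findSingletonWords (text : String) : List String :=
  -- dd = defaultdict(int); for word in text.split(): dd[word] += 1
  let dd : PySem.Dict String Int :=
    (PySem.Str.split₀ text).foldl (fun d word => d.modify word 0 (· + 1)) PySem.Dict.empty
  -- rtn = set(); for key in dd: if dd[key] == 1: rtn.add(key)
  dd.keys.foldl (fun rtn key => if dd.getD key 0 == 1 then PySem.Set.add rtn key else rtn)
    PySem.Set.empty

-- ===== PORT B =====
-- loop body: if w in once: once.discard(w); repeated.add(w)
--            elif w not in repeated: once.add(w)
def fswStep (st : PySem.Set String × PySem.Set String) (w : String) :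
    PySem.Set String × PySem.Set String :=
  if PySem.Set.contains st.1 w then (PySem.Set.discard st.1 w, PySem.Set.add st.2 w)
  else if !(PySem.Set.contains st.2 w) then (PySem.Set.add st.1 w, st.2)
  else st

def findSingletonWords_alt (text : String) : List String :=
  -- once, repeated = set(), set(); for w in text.split(): <fswStep>; return once
  ((PySem.Str.split₀ text).foldl fswStep (PySem.Set.empty, PySem.Set.empty)).1

-- ===== PRECONDITION & SPEC =====
def Spec_findSingletonWords (text : String) (out : List String) : Prop := out = findSingletonWords_alt text
instance (text : String) (out : List String) : Decidable (Spec_findSingletonWords text out) := by unfold Spec_findSingletonWords; infer_instance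

-- ===== CLAIM =====
def Claim_equal_findSingletonWords : Prop := ∀ (text : String), Dom_findSingletonWords text → Spec_findSingletonWords text (findSingletonWords text)

-- ===== LEMMAS AND PROOFS =====

/-- The singleton words of `p`, as a list in first-occurrence order. -/
def fswF (p : List String) : List String :=
  (PySem.Set.ofList p).filter (fun w => p.count w == 1)

/-- Loop invariant for B's single pass: if `once` is exactly the singleton words of the
already-processed prefix `p` (in first-occurrence order) and `rep` contains exactly
the words occurring at least twice in `p`, then after folding the remaining words `l`
the first component is the singleton words of `p ++ l`. -/
theorem fswStep_inv (l : List String) (p once rep : List String)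
    (ho : once = fswF p) (hr : ∀ w, w ∈ rep ↔ 2 ≤ p.count w) :
    (l.foldl fswStep (once, rep)).1 = fswF (p ++ l) := by
  induction l generalizing p once rep with
  | nil => simpa using ho
  | cons x xs ih =>
    have hmem_once : ∀ w, w ∈ once ↔ p.count w = 1 := by
      intro w
      subst ho
      simp only [fswF, List.mem_filter, PySem.Set.mem_ofList, beq_iff_eq]
      constructor
      · rintro ⟨_, h2⟩; exact h2
      · intro h1; exact ⟨List.count_pos_iff.1 (by omega), h1⟩
    have hcount : ∀ w, (p ++ [x]).count w = p.count w + (if x = w then 1 else 0) := by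
      intro w; simp [List.count_append, List.count_singleton]
    have hofL : PySem.Set.ofList (p ++ [x]) = PySem.Set.add (PySem.Set.ofList p) x :=
      PySem.Set.ofList_append_singleton _ _
    have hassoc : p ++ x :: xs = (p ++ [x]) ++ xs := by simp
    rw [List.foldl_cons, hassoc]
    by_cases h1 : p.count x = 1
    · -- x was seen exactly once: move it from `once` to `rep`
      have hxo : x ∈ once := (hmem_once x).2 h1
      have hstep : fswStep (once, rep) x = (PySem.Set.discard once x, PySem.Set.add rep x) := by
        simp [fswStep, hxo]
      rw [hstep]
      apply ih
      · -- discard once x = singleton words of p ++ [x]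
        subst ho
        have hxin : x ∈ PySem.Set.ofList p :=
          (PySem.Set.mem_ofList _ _).2 (List.count_pos_iff.1 (by omega))
        simp only [fswF, hofL, PySem.Set.add_of_mem hxin, PySem.Set.discard,
          List.filter_filter]
        apply List.filter_congr
        intro w hw
        by_cases hwx : w = x
        · subst hwx
          rw [hcount, if_pos rfl, h1]
          simp
        · rw [hcount, if_neg (fun h => hwx h.symm)]
          simp [hwx]
      · intro w
        rw [PySem.Set.mem_add, hr, hcount]
        by_cases hwx : w = x
        · subst hwx; rw [if_pos rfl, h1]; simp
        · rw [if_neg (fun h => hwx h.symm)]; simp [hwx]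
    · by_cases h2 : 2 ≤ p.count x
      · -- x already repeated: state unchanged
        have hxo : x ∉ once := fun hm => h1 ((hmem_once x).1 hm)
        have hxr : x ∈ rep := (hr x).2 h2
        have hstep : fswStep (once, rep) x = (once, rep) := by
          simp [fswStep, hxo, hxr]
        rw [hstep]
        apply ih
        · subst ho
          have hxin : x ∈ PySem.Set.ofList p :=
            (PySem.Set.mem_ofList _ _).2 (List.count_pos_iff.1 (by omega))
          simp only [fswF, hofL, PySem.Set.add_of_mem hxin]
          apply List.filter_congr
          intro w hw
          by_cases hwx : w = x
          · subst hwx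
            rw [hcount, if_pos rfl]
            have hl : (List.count w p == 1) = false := beq_eq_false_iff_ne.2 h1
            have hr' : (List.count w p + 1 == 1) = false := beq_eq_false_iff_ne.2 (by omega)
            rw [hl, hr']
          · rw [hcount, if_neg (fun h => hwx h.symm)]; simp
        · intro w
          rw [hr, hcount]
          by_cases hwx : w = x
          · subst hwx; rw [if_pos rfl]; omega
          · rw [if_neg (fun h => hwx h.symm)]; simp
      · -- x unseen so far: add it to `once`
        have h0 : p.count x = 0 := by omega
        have hxnotp : x ∉ p := by
          intro hmem; exact absurd (List.count_pos_iff.2 hmem) (by omega)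
        have hxo : x ∉ once := fun hm => h1 ((hmem_once x).1 hm)
        have hxr : x ∉ rep := fun hm => h2 ((hr x).1 hm)
        have hstep : fswStep (once, rep) x = (PySem.Set.add once x, rep) := by
          simp [fswStep, hxo, hxr]
        rw [hstep]
        apply ih
        · subst ho
          have hxno : x ∉ PySem.Set.ofList p :=
            fun hm => hxnotp ((PySem.Set.mem_ofList _ _).1 hm)
          have hxnof : x ∉ fswF p := by
            intro hm; exact hxno (List.mem_of_mem_filter hm)
          rw [PySem.Set.add_of_not_mem hxnof]
          simp only [fswF, hofL, PySem.Set.add_of_not_mem hxno, List.filter_append]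
          congr 1
          · apply List.filter_congr
            intro w hw
            have hwx : w ≠ x := fun he => hxno (he ▸ hw)
            rw [hcount, if_neg (fun h => hwx h.symm)]; simp
          · rw [List.filter_singleton]
            rw [hcount, if_pos rfl, h0]
            simp
        · intro w
          rw [hr, hcount]
          by_cases hwx : w = x
          · subst hwx; rw [if_pos rfl, h0]; simp
          · rw [if_neg (fun h => hwx h.symm)]; simp

-- ===== VERDICT =====
theorem findSingletonWords_spec : Claim_equal_findSingletonWords := by
  intro text _
  unfold Spec_findSingletonWords
  simp only [findSingletonWords, findSingletonWords_alt]
  -- A's side: reduce the dict-counting pass + key loop to filtering the ordered dedup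
  have hempty : (PySem.Set.empty : PySem.Set String) = [] := rfl
  rw [← List.foldl_filter, hempty, ← PySem.Set.ofList_eq_foldl,
      show (PySem.Str.split₀ text).foldl (fun d word => d.modify word 0 (· + 1)) PySem.Dict.empty
         = PySem.Dict.counter (PySem.Str.split₀ text) from rfl,
      PySem.Dict.keys_counter]
  simp only [PySem.Dict.getD_counter]
  have hpred : (fun key => ((PySem.Str.split₀ text).count key : Int) == 1)
      = (fun w => ((PySem.Str.split₀ text).count w == 1 : Bool)) := by
    funext w
    by_cases hc : (PySem.Str.split₀ text).count w = 1 <;> simp [hc]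
  rw [hpred]
  have hnd : (List.filter (fun w => (PySem.Str.split₀ text).count w == 1)
      (PySem.Set.ofList (PySem.Str.split₀ text))).Nodup :=
    List.Nodup.filter _ (PySem.Set.nodup_ofList _)
  have hA : PySem.Set.ofList (List.filter (fun w => (PySem.Str.split₀ text).count w == 1)
        (PySem.Set.ofList (PySem.Str.split₀ text)))
      = List.filter (fun w => (PySem.Str.split₀ text).count w == 1)
        (PySem.Set.ofList (PySem.Str.split₀ text)) :=
    PySem.Set.ofList_eq_self_of_nodup _ hnd
  rw [hA]
  -- B's side: the loop invariant, started from the empty prefix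
  rw [fswStep_inv (PySem.Str.split₀ text) [] [] [] (by simp [fswF]) (by intro w; simp)]
  simp [fswF]
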